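-- pv_equiv track=rewrite | github.com/pypi-data/pypi-mirror-57 | packages/django-rest-framework-expandable/django_rest_framework_expandable-0.5.0-py3-none-any.whl/rest_framework_expandable/utils.py | remove_redundant_paths
-- ===== SOURCE A (Python) =====
-- def remove_redundant_paths(paths):
--     """
--     Returns a list of unique paths.
--     """
--     results = []
--     for path in paths:
--         redundant = False
--         paths_copy = paths[:]
--         paths_copy.pop(paths.index(path))
--         for p in paths_copy:
--             if p.startswith(path) and len(p) > len(path):
--                 redundant = True
--         if redundant is False:
--             results.append(path)
--     return results
-- ===== SOURCE B (Python) =====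
-- def remove_redundant_paths(paths):
--     """
--     Returns a list of unique paths.
--     """
--     uniq = sorted(set(paths))
--     redundant = set()
--     for s, t in zip(uniq, uniq[1:]):
--         if t.startswith(s):
--             redundant.add(s)
--     return [p for p in paths if p not in redundant]
-- ===== Notes on version B (the rewrite author's own statement) =====
-- stated objective: faster
-- what changed: A checks every path against every other path (after copying the list and popping the current element); B sorts the distinct paths once and marks a path redundant iff its immediate sorted successor starts with it, then filters the original list against that set.
import Mathlib
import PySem

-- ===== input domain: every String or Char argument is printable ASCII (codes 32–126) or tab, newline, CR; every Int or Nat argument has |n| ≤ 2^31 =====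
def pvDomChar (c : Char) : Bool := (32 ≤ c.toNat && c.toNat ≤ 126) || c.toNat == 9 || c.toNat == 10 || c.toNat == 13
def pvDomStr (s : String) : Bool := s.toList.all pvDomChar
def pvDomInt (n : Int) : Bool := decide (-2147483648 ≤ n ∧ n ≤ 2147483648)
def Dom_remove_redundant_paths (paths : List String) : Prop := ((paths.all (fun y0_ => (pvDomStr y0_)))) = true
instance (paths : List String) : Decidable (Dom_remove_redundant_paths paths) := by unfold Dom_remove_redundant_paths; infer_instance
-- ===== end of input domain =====

-- B replaces A's quadratic all-pairs prefix scan by sorting the distinct paths and testing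
-- only adjacent pairs (a path is a proper prefix of some path iff of its sorted successor); faster.

-- ===== PORT A =====
def remove_redundant_paths (paths : List String) : List String :=
  paths.foldl (fun results path =>
    let paths_copy := PySem.List.slice paths none none
    let paths_copy :=
      match PySem.List.index? paths path with
      | none => paths_copy        -- unreachable (ValueError): path is drawn from paths
      | some i =>
        match PySem.List.pop? paths_copy (i : Int) with
        | none => paths_copy      -- unreachable (IndexError)
        | some r => r.2
    let redundant := paths_copy.foldl (fun redundant p =>
      if PySem.Str.startswith p path && decide (PySem.Str.len path < PySem.Str.len p) then true
      else redundant) false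
    if redundant = false then results ++ [path] else results) []

-- ===== PORT B =====
def remove_redundant_paths_alt (paths : List String) : List String :=
  let uniq := PySem.List.sorted (PySem.Set.ofList paths) (fun x => x) false
  let redundant : PySem.Set String :=
    (uniq.zip (PySem.List.slice uniq (some 1) none)).foldl
      (fun acc st => if PySem.Str.startswith st.2 st.1 then PySem.Set.add acc st.1 else acc)
      PySem.Set.empty
  paths.filter (fun p => !(PySem.Set.contains redundant p))

-- ===== PRECONDITION & SPEC =====
def Spec_remove_redundant_paths (paths : List String) (out : List String) : Prop := out = remove_redundant_paths_alt paths
instance (paths : List String) (out : List String) : Decidable (Spec_remove_redundant_paths paths out) := by unfold Spec_remove_redundant_paths; infer_instance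

-- ===== CLAIM (what is proved, stated in full; the proofs are below) =====
def Claim_equal_remove_redundant_paths : Prop := ∀ (paths : List String), Dom_remove_redundant_paths paths → Spec_remove_redundant_paths paths (remove_redundant_paths paths)

-- ===== LEMMAS AND PROOFS =====

-- the redundancy test A applies to a candidate `path` against another path `p`
def pvCond (path p : String) : Bool :=
  PySem.Str.startswith p path && decide (PySem.Str.len path < PySem.Str.len p)

-- A's inner flag loop is `any`
theorem pv_inner_any (path : String) (l : List String) (b : Bool) :
    l.foldl (fun redundant p =>
        if (PySem.Str.startswith p path && decide (PySem.Str.len path < PySem.Str.len p)) = true then true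
        else redundant) b
      = (b || l.any (pvCond path)) := by
  have hc : ∀ p, (PySem.Str.startswith p path && decide (PySem.Str.len path < PySem.Str.len p)) = pvCond path p :=
    fun _ => rfl
  induction l generalizing b with
  | nil => simp
  | cons x xs ih =>
    rw [List.foldl_cons, List.any_cons, hc x]
    cases h : pvCond path x
    · rw [if_neg (by simp), ih]
      simp
    · rw [if_pos rfl, ih]
      simp

-- a path never makes itself redundant
theorem pv_cond_self (path : String) : pvCond path path = false := by
  simp [pvCond]

-- A computes the filter by the all-pairs condition
-- the first occurrence of path is erased; erasing it does not change `any pvCond`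
theorem pv_eraseIdx_mid (pre suf : List String) (path : String) :
    (pre ++ path :: suf).eraseIdx pre.length = pre ++ suf := by
  induction pre with
  | nil => simp
  | cons a l ih => simp [ih]

theorem pv_A_filter (paths : List String) :
    remove_redundant_paths paths = paths.filter (fun path => !(paths.any (pvCond path))) := by
  unfold remove_redundant_paths
  rw [PySem.List.foldl_congr_mem (g := fun results path =>
        if (!(paths.any (pvCond path))) = true then results ++ [path] else results)]
  · rw [PySem.List.foldl_append_if_eq_filter]
    simp
  · intro acc path hmem
    obtain ⟨k, hk⟩ := Option.isSome_iff_exists.mp ((PySem.List.index?_isSome_iff paths path).mpr hmem)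
    obtain ⟨hklt, hval, -⟩ := PySem.List.getElem_of_index?_eq_some hk
    simp only [PySem.List.slice_none_none, hk]
    rw [PySem.List.pop?_natCast _ _ hklt]
    simp only [pv_inner_any, Bool.false_or]
    have herase : (paths.eraseIdx k).any (pvCond path) = paths.any (pvCond path) := by
      obtain ⟨pre, suf, hps, hlen⟩ : ∃ pre suf, paths = pre ++ path :: suf ∧ pre.length = k := by
        refine ⟨paths.take k, paths.drop (k + 1), ?_, by rw [List.length_take]; omega⟩
        conv_lhs => rw [← List.take_append_drop k paths]
        rw [List.drop_eq_getElem_cons hklt, hval]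
      subst hlen
      rw [hps, pv_eraseIdx_mid]
      simp [pv_cond_self]
    rw [herase]
    by_cases h : paths.any (pvCond path) = true <;> simp [h]

-- proper prefix gives lexicographic Lex (no order hypothesis needed)
theorem pv_prefix_lex {α : Type} {r : α → α → Prop} {s t : List α}
    (h : s <+: t) (hne : s ≠ t) : List.Lex r s t := by
  induction s generalizing t with
  | nil =>
    cases t with
    | nil => exact absurd rfl hne
    | cons a l => exact List.Lex.nil
  | cons c s' ih =>
    obtain ⟨u, hu⟩ := h
    cases t with
    | nil => simp at hu
    | cons d t' =>
      rw [List.cons_append] at hu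
      have hcd : c = d := by injection hu
      have ht' : s' ++ u = t' := by injection hu
      subst hcd
      exact List.Lex.cons (ih ⟨u, ht'⟩ (by intro h; exact hne (by rw [h])))

-- if s is a prefix of p and s < q < p lexicographically, then s is a prefix of q
theorem pv_between {s q p : List Char}
    (hsp : s <+: p) (h1 : List.Lex (· < ·) s q) (h2 : List.Lex (· < ·) q p) : s <+: q := by
  induction s generalizing q p with
  | nil => exact List.nil_prefix
  | cons c s' ih =>
    obtain ⟨u, hu⟩ := hsp
    cases q with
    | nil => cases h1
    | cons d q' =>
      cases p with
      | nil => simp at hu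
      | cons e p' =>
        have hce : c = e := by injection hu
        have hsp' : s' <+: p' := ⟨u, by injection hu⟩
        subst hce
        cases h1 with
        | rel hcd =>
          cases h2 with
          | rel hdc => exact absurd hdc (lt_asymm hcd)
          | cons h2' => exact absurd hcd (lt_irrefl _)
        | cons h1' =>
          cases h2 with
          | rel hdc => exact absurd hdc (lt_irrefl _)
          | cons h2' => exact List.cons_prefix_cons.mpr ⟨rfl, ih hsp' h1' h2'⟩

-- membership in the set built by B's loop
theorem pv_mem_fold (l : List (String × String)) (acc : PySem.Set String) (x : String) :
    (x ∈ l.foldl (fun acc st => if PySem.Str.startswith st.2 st.1 then PySem.Set.add acc st.1 else acc) acc)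
      ↔ x ∈ acc ∨ ∃ st ∈ l, PySem.Str.startswith st.2 st.1 = true ∧ st.1 = x := by
  induction l generalizing acc with
  | nil => simp
  | cons y ys ih =>
    simp only [List.foldl_cons, List.mem_cons]
    by_cases h : PySem.Str.startswith y.2 y.1 = true
    · rw [if_pos h, ih]
      simp [PySem.Set.mem_add]
      tauto
    · rw [if_neg h, ih]
      constructor
      · rintro (ha | ⟨st, hst, hs, he⟩)
        · exact Or.inl ha
        · exact Or.inr ⟨st, Or.inr hst, hs, he⟩
      · rintro (ha | ⟨st, (rfl | hst), hs, he⟩)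
        · exact Or.inl ha
        · exact absurd hs h
        · exact Or.inr ⟨st, hst, hs, he⟩

-- pairs of `zip u u.tail` are exactly the adjacent pairs of u
theorem pv_mem_zip_tail (u : List String) (st : String × String) :
    st ∈ u.zip u.tail ↔ ∃ i, ∃ _ : i + 1 < u.length, st = (u[i], u[i + 1]) := by
  rw [List.mem_iff_getElem]
  constructor
  · rintro ⟨i, hi, rfl⟩
    have h1 : i + 1 < u.length := by
      simp [List.length_zip, List.length_tail] at hi; omega
    refine ⟨i, h1, ?_⟩
    rw [List.getElem_zip, List.getElem_tail]
  · rintro ⟨i, h1, rfl⟩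
    refine ⟨i, by simp [List.length_zip, List.length_tail]; omega, ?_⟩
    rw [List.getElem_zip, List.getElem_tail]

-- pvCond in terms of list-level prefix
theorem pv_cond_iff (path p : String) :
    pvCond path p = true ↔ path.toList <+: p.toList ∧ path.toList ≠ p.toList := by
  simp only [pvCond, Bool.and_eq_true, decide_eq_true_eq, PySem.Str.startswith_eq,
    PySem.Chars.startswith_iff, PySem.Str.len_eq]
  constructor
  · rintro ⟨hp, hl⟩
    exact ⟨hp, fun he => by simp [he] at hl⟩
  · rintro ⟨hp, hne⟩
    exact ⟨hp, by exact_mod_cast lt_of_le_of_ne hp.length_le (fun he => hne (hp.eq_of_length he))⟩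

-- the heart: among the strictly sorted distinct paths, `path` has a proper extension
-- iff its immediate successor starts with it
theorem pv_any_iff_adjacent (paths : List String) (path : String) (hmem : path ∈ paths)
    (u : List String) (hu_def : u = PySem.List.sorted (PySem.Set.ofList paths) (fun x => x) false) :
    paths.any (pvCond path) = true ↔
      ∃ i, ∃ _ : i + 1 < u.length, u[i] = path ∧ pvCond path u[i + 1] = true := by
  have hpair : u.Pairwise (· < ·) := hu_def ▸ PySem.List.sorted_ofList_pairwise_lt paths
  have hmono := List.pairwise_iff_getElem.mp hpair
  have hu : ∀ x, x ∈ u ↔ x ∈ paths := by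
    intro x; rw [hu_def, PySem.List.mem_sorted, PySem.Set.mem_ofList]
  constructor
  · rw [List.any_eq_true]
    rintro ⟨p, hp, hc⟩
    obtain ⟨hpre, hne⟩ := (pv_cond_iff path p).mp hc
    obtain ⟨i, hi, hui⟩ := List.mem_iff_getElem.mp ((hu path).mpr hmem)
    obtain ⟨j, hj, huj⟩ := List.mem_iff_getElem.mp ((hu p).mpr hp)
    have hlex : List.Lex (· < ·) path.toList p.toList := pv_prefix_lex hpre hne
    have hsp : path < p := String.lt_iff_toList_lt.mpr (List.lex_lt.mp hlex)
    have hij : i < j := by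
      rcases lt_trichotomy i j with h | h | h
      · exact h
      · exact absurd (by rw [← hui, ← huj]; simp [h] : path = p) (ne_of_lt hsp)
      · exact absurd (hmono j i hj hi h) (by rw [hui, huj]; exact not_lt_of_gt hsp)
    have h1 : i + 1 < u.length := by omega
    refine ⟨i, h1, hui, ?_⟩
    have hq : path < u[i + 1] := hui ▸ hmono i (i + 1) hi h1 (by omega)
    have hqlex : List.Lex (· < ·) path.toList (u[i + 1]).toList :=
      List.lex_lt.mpr (String.lt_iff_toList_lt.mp hq)
    rcases Nat.eq_or_lt_of_le hij with he | hlt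
    · subst he
      rw [pv_cond_iff, huj]
      exact ⟨hpre, hne⟩
    · have hqp : u[i + 1] < p := huj ▸ hmono (i + 1) j h1 hj hlt
      have hqplex : List.Lex (· < ·) (u[i + 1]).toList p.toList :=
        List.lex_lt.mpr (String.lt_iff_toList_lt.mp hqp)
      have hqpre := pv_between hpre hqlex hqplex
      rw [pv_cond_iff]
      exact ⟨hqpre, fun he => (ne_of_lt hq) (String.toList_inj.mp he)⟩
  · rintro ⟨i, h1, hui, hc⟩
    rw [List.any_eq_true]
    exact ⟨u[i + 1], (hu _).mp (List.getElem_mem h1), hc⟩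

theorem remove_redundant_paths_spec_aux (paths : List String) :
    remove_redundant_paths paths = remove_redundant_paths_alt paths := by
  rw [pv_A_filter]
  unfold remove_redundant_paths_alt
  simp only [PySem.List.slice_from_one]
  apply List.filter_congr
  intro path hmem
  congr 1
  have hcont : ∀ (s : PySem.Set String) (x : String),
      PySem.Set.contains s x = true ↔ x ∈ s := by
    intro s x; simp [PySem.Set.contains]
  rw [Bool.eq_iff_iff, hcont, pv_mem_fold]
  simp only [PySem.Set.empty, List.not_mem_nil, false_or]
  rw [pv_any_iff_adjacent paths path hmem _ rfl]
  constructor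
  · rintro ⟨i, h1, hui, hc⟩
    refine ⟨(_, _), (pv_mem_zip_tail _ _).mpr ⟨i, h1, rfl⟩, ?_, hui⟩
    have := (pv_cond_iff path _).mp hc
    rw [PySem.Str.startswith_eq, PySem.Chars.startswith_iff]
    exact hui ▸ this.1
  · rintro ⟨st, hst, hsw, hfst⟩
    obtain ⟨i, h1, rfl⟩ := (pv_mem_zip_tail _ _).mp hst
    simp only at hsw hfst
    refine ⟨i, h1, hfst, ?_⟩
    rw [pv_cond_iff]
    have hpair : (PySem.List.sorted (PySem.Set.ofList paths) (fun x => x) false).Pairwise (· < ·) :=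
      PySem.List.sorted_ofList_pairwise_lt paths
    have hlt := List.pairwise_iff_getElem.mp hpair i (i + 1) (by omega) h1 (by omega)
    rw [PySem.Str.startswith_eq, PySem.Chars.startswith_iff] at hsw
    exact ⟨hfst ▸ hsw, fun he => (ne_of_lt hlt)
      (hfst ▸ (String.toList_inj.mp he) : _ = _)⟩

-- ===== VERDICT (by name: the statement is the Claim_ definition above) =====
theorem remove_redundant_paths_spec : Claim_equal_remove_redundant_paths := by
  intro paths _
  exact remove_redundant_paths_spec_aux paths
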